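-- pv_equiv track=rewrite | github.com/fahim-nion/problem-solving | 221 Algo/1st week/prob 5.py | sorted_possible
-- ===== SOURCE A (Python) =====
-- def sorted_possible(arr):
--     n = len(arr)
--
--     duplicate = False
--     for i in range(n):
--         for j in range(i + 1, n):
--             if arr[i] == arr[j]:
--                 duplicate = True
--                 break
--         if duplicate:
--             break
--
--     if duplicate:
--         return True
--
--
--     inv_count = 0
--     for i in range(n):
--         for j in range(i + 1, n):
--             if arr[i] > arr[j]:
--                 inv_count += 1
--
--
--     if inv_count % 2 == 0:
--         return True
--     else:
--         return False
-- ===== SOURCE B (Python) =====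
-- def sorted_possible(arr):
--     # One backward pass: return True at the first duplicate; otherwise track
--     # only the parity of the inversion count (pairs left>right).
--     seen = set()
--     odd = False
--     for x in reversed(arr):
--         if x in seen:
--             return True
--         if sum(1 for y in seen if y < x) % 2 == 1:
--             odd = not odd
--         seen.add(x)
--     return not odd
-- ===== Notes on version B (the rewrite author's own statement) =====
-- stated objective: alternative
-- what changed: A's two separate index-nested quadratic passes (duplicate scan, then full inversion count) become one backward value pass that returns at the first duplicate seen in a set and keeps only the running parity of the inversion count.
import Mathlib
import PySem

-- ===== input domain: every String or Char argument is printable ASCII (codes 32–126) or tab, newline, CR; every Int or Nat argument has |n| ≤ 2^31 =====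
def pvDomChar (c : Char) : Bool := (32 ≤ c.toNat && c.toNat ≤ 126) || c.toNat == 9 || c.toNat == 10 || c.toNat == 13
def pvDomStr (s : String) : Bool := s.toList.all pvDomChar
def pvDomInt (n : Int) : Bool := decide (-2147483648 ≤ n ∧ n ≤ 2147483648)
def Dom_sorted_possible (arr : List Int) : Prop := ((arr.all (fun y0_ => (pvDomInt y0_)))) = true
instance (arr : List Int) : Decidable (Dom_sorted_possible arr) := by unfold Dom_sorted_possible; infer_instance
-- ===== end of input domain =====

-- B replaces A's two quadratic index-nested passes by a single backward value pass that
-- detects a duplicate in a set and keeps only the parity of the inversion count (objective: alternative).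

-- ===== PORT A =====
def sorted_possible (arr : List Int) : Bool :=
  let n : Int := arr.length
  let duplicate : Bool :=
    (PySem.List.pyRange 0 n 1).any (fun i =>
      (PySem.List.pyRange (i + 1) n 1).any (fun j =>
        PySem.List.pyGetD arr i 0 == PySem.List.pyGetD arr j 0))
  if duplicate then true
  else
    let inv_count : Int :=
      (PySem.List.pyRange 0 n 1).foldl (fun acc i =>
        (PySem.List.pyRange (i + 1) n 1).foldl (fun acc2 j =>
          if PySem.List.pyGetD arr i 0 > PySem.List.pyGetD arr j 0 then acc2 + 1 else acc2) acc) 0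
    PySem.Int.mod inv_count 2 == 0

-- ===== PORT B =====
-- one backward pass: first duplicate returns True; otherwise `odd` tracks the inversion parity
def spLoop : List Int → PySem.Set Int → Bool → Bool
  | [], _, odd => !odd
  | x :: rest, seen, odd =>
    if PySem.Set.contains seen x then true
    else
      spLoop rest (PySem.Set.add seen x)
        (if (seen.countP (fun y => decide (y < x))) % 2 == 1 then !odd else odd)

def sorted_possible_alt (arr : List Int) : Bool :=
  spLoop arr.reverse PySem.Set.empty false

-- ===== PRECONDITION & SPEC =====
def Spec_sorted_possible (arr : List Int) (out : Bool) : Prop := out = sorted_possible_alt arr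
instance (arr : List Int) (out : Bool) : Decidable (Spec_sorted_possible arr out) := by unfold Spec_sorted_possible; infer_instance

-- ===== CLAIM (what is proved, stated in full; the proofs are below) =====
def Claim_equal_sorted_possible : Prop := ∀ (arr : List Int), Dom_sorted_possible arr → Spec_sorted_possible arr (sorted_possible arr)

-- ===== LEMMAS AND PROOFS =====

-- the inversion count, by structural recursion (for each head, later smaller elements)
def invA : List Int → Nat
  | [] => 0
  | x :: r => r.countP (fun y => decide (x > y)) + invA r

-- B's running count: for each element consumed, elements already seen that lie below it
def crossIntra : List Int → List Int → Nat
  | [], _ => 0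
  | x :: r, seen => seen.countP (fun y => decide (y < x)) + crossIntra r (seen ++ [x])

theorem dup_inner_eq (arr : List Int) (k : Nat) :
    ((PySem.List.pyRange ((k : Int) + 1) (arr.length : Int) 1).any (fun j =>
      PySem.List.pyGetD arr (k : Int) 0 == PySem.List.pyGetD arr j 0))
    = (arr.drop (k + 1)).any (fun y => arr.getD k 0 == y) := by
  have h := PySem.List.map_pyGetD_pyRange' arr 0 (a := (k : Int) + 1) (by positivity)
  have hmap : ((PySem.List.pyRange ((k : Int) + 1) (arr.length : Int) 1).any (fun j =>
      PySem.List.pyGetD arr (k : Int) 0 == PySem.List.pyGetD arr j 0))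
      = ((PySem.List.pyRange ((k : Int) + 1) (arr.length : Int) 1).map (fun j =>
        PySem.List.pyGetD arr j 0)).any (fun y => PySem.List.pyGetD arr (k : Int) 0 == y) := by
    rw [List.any_map]; rfl
  rw [hmap, h, PySem.List.pyGetD_natCast]
  have ht : ((k : Int) + 1).toNat = k + 1 := by omega
  rw [ht]

theorem dup_outer_eq (arr : List Int) :
    (List.range arr.length).any (fun k => (arr.drop (k + 1)).any (fun y => arr.getD k 0 == y))
    = !decide arr.Nodup := by
  induction arr with
  | nil => simp
  | cons x r ih =>
    rw [List.length_cons, List.range_succ_eq_map]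
    simp only [List.any_cons, List.any_map, Function.comp_def, Nat.succ_eq_add_one,
      List.drop_succ_cons, List.getD_cons_succ, List.getD_cons_zero, List.drop_zero]
    rw [ih]
    simp [List.nodup_cons, List.any_beq]

theorem inv_inner_eq (arr : List Int) (k : Nat) (acc : Int) :
    ((PySem.List.pyRange ((k : Int) + 1) (arr.length : Int) 1).foldl (fun acc2 j =>
      if PySem.List.pyGetD arr (k : Int) 0 > PySem.List.pyGetD arr j 0 then acc2 + 1 else acc2) acc)
    = acc + ((arr.drop (k + 1)).countP (fun y => decide (arr.getD k 0 > y)) : Int) := by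
  rw [PySem.List.foldl_pyRange_pyGetD' arr 0
      (fun acc2 y => if PySem.List.pyGetD arr (k : Int) 0 > y then acc2 + 1 else acc2) acc
      (a := (k : Int) + 1) (by positivity)]
  have ht : ((k : Int) + 1).toNat = k + 1 := by omega
  rw [ht, PySem.List.foldl_ite_add_one, PySem.List.pyGetD_natCast]

theorem inv_outer_eq (arr : List Int) :
    ((List.range arr.length).map (fun k =>
      ((arr.drop (k + 1)).countP (fun y => decide (arr.getD k 0 > y)) : Int))).sum
    = (invA arr : Int) := by
  induction arr with
  | nil => simp [invA]
  | cons x r ih =>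
    rw [List.length_cons, List.range_succ_eq_map, List.map_cons, List.map_map]
    simp only [Function.comp_def, Nat.succ_eq_add_one, List.drop_succ_cons, List.getD_cons_succ,
      List.getD_cons_zero, List.drop_zero, List.sum_cons]
    rw [ih, invA]
    push_cast
    ring

theorem sorted_possible_eq (arr : List Int) :
    sorted_possible arr = if arr.Nodup then (invA arr % 2 == 0) else true := by
  unfold sorted_possible
  simp only [PySem.List.pyRange_zero_nat arr.length, List.any_map, List.foldl_map,
    Function.comp_def]
  simp only [dup_inner_eq, inv_inner_eq]
  rw [dup_outer_eq]
  by_cases h : arr.Nodup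
  · simp only [h, decide_true, Bool.not_true, Bool.false_eq_true, if_false, if_true]
    rw [PySem.List.foldl_add (l := List.range arr.length)
      (g := fun k => ((arr.drop (k + 1)).countP (fun y => decide (arr.getD k 0 > y)) : Int)) 0]
    rw [inv_outer_eq, zero_add]
    rw [PySem.Int.mod_eq_emod_of_pos (h := by norm_num)]
    have hc : ((invA arr : Int)) % 2 = ((invA arr % 2 : Nat) : Int) := by push_cast; ring
    rw [hc]
    rcases Nat.mod_two_eq_zero_or_one (invA arr) with h2 | h2 <;> rw [h2] <;> rfl
  · simp [h]

theorem crossIntra_snoc (l : List Int) (x : Int) : ∀ (seen : List Int),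
    crossIntra (l ++ [x]) seen = crossIntra l seen + (seen ++ l).countP (fun y => decide (y < x)) := by
  induction l with
  | nil => intro seen; simp [crossIntra]
  | cons z r ih =>
    intro seen
    simp only [List.cons_append, crossIntra, ih (seen ++ [z]), List.append_assoc,
      List.nil_append]
    ring

theorem crossIntra_reverse (l : List Int) :
    crossIntra l.reverse [] = invA l := by
  induction l with
  | nil => rfl
  | cons x r ih =>
    rw [List.reverse_cons, crossIntra_snoc, ih, invA]
    simp only [List.nil_append, List.countP_reverse]
    have hgt : (fun y => decide (y < x)) = (fun y => decide (x > y)) := rfl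
    rw [hgt]
    ring

theorem spLoop_char (xs : List Int) : ∀ (seen : List Int) (odd : Bool), seen.Nodup →
    spLoop xs seen odd =
      if (xs ++ seen).Nodup then !(odd ^^ (crossIntra xs seen % 2 == 1)) else true := by
  induction xs with
  | nil => intro seen odd h; simp [spLoop, crossIntra, h]
  | cons x r ih =>
    intro seen odd h
    rw [spLoop]
    by_cases hx : x ∈ seen
    · have hnd : ¬ (((x :: r) ++ seen).Nodup) := by
        rw [List.cons_append, List.nodup_cons]
        rintro ⟨hmem, -⟩
        exact hmem (by simp [hx])
      rw [if_pos (by simp [PySem.Set.contains, hx]), if_neg hnd]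
    · have hadd : PySem.Set.add seen x = seen ++ [x] := by
        simp [PySem.Set.add, PySem.Set.contains, hx]
      rw [if_neg (by simp [PySem.Set.contains, hx]), hadd,
        ih (seen ++ [x]) _ (by
          rw [List.nodup_append]
          refine ⟨h, List.nodup_singleton x, ?_⟩
          intro a ha b hb
          rw [List.mem_singleton] at hb
          subst hb
          exact fun e => hx (e ▸ ha))]
      have hperm : (r ++ (seen ++ [x])).Perm ((x :: r) ++ seen) := by
        have h1 := (List.perm_append_comm (l₁ := [x]) (l₂ := r ++ seen)).symm
        simpa [List.append_assoc] using h1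
      simp only [List.Perm.nodup_iff hperm]
      by_cases hn : ((x :: r) ++ seen).Nodup
      · rw [if_pos hn, if_pos hn]
        rw [crossIntra]
        set a := seen.countP (fun y => decide (y < x)) with ha
        set b := crossIntra r (seen ++ [x]) with hb
        have hstep : (if a % 2 == 1 then !odd else odd) = (odd ^^ (a % 2 == 1)) := by
          cases odd <;> rcases Nat.mod_two_eq_zero_or_one a with h2 | h2 <;> simp [h2]
        rw [hstep]
        have hxor : ((odd ^^ (a % 2 == 1)) ^^ (b % 2 == 1)) = (odd ^^ ((a + b) % 2 == 1)) := by
          rcases Nat.mod_two_eq_zero_or_one a with h2 | h2 <;>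
            rcases Nat.mod_two_eq_zero_or_one b with h3 | h3 <;>
            cases odd <;> simp [h2, h3, Nat.add_mod, Bool.xor_comm]
        rw [← hxor]
      · rw [if_neg hn, if_neg hn]

theorem sorted_possible_alt_eq (arr : List Int) :
    sorted_possible_alt arr = if arr.Nodup then (invA arr % 2 == 0) else true := by
  unfold sorted_possible_alt
  rw [show (PySem.Set.empty : PySem.Set Int) = ([] : List Int) from rfl,
    spLoop_char arr.reverse [] false List.nodup_nil, crossIntra_reverse]
  simp only [List.append_nil, List.nodup_reverse, Bool.false_xor]
  by_cases h : arr.Nodup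
  · rw [if_pos h, if_pos h]
    rcases Nat.mod_two_eq_zero_or_one (invA arr) with h2 | h2 <;> rw [h2] <;> rfl
  · rw [if_neg h, if_neg h]

-- ===== VERDICT (by name: the statement is the Claim_ definition above) =====
theorem sorted_possible_spec : Claim_equal_sorted_possible := by
  intro arr _
  show sorted_possible arr = sorted_possible_alt arr
  rw [sorted_possible_eq, sorted_possible_alt_eq]
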